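-- pv_equiv track=rewrite | github.com/vitorloures/Competitive_programming | longest_progression.py | get_most_frequent_diff
-- ===== SOURCE A (Python) =====
-- def get_most_frequent_diff(a_list):
--     diff_count = {}
--     diff_list = []
--     for i in range(1, len(a_list)):
--         ai_prior = a_list[i - 1]
--         ai = a_list[i]
--         diff = ai - ai_prior
--         diff_list.append(diff)
--         count = diff_count.get(diff, 0)
--         count += 1
--         diff_count[diff] = count
--     return sorted(diff_count.items(), key=lambda kv: (kv[1], kv[0]), reverse=True)[0][0]
-- ===== SOURCE B (Python) =====
-- def get_most_frequent_diff(a_list):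
--     diffs = sorted(b - a for a, b in zip(a_list, a_list[1:]))
--     best_count = 0
--     best_val = diffs[0]
--     run = 0
--     prev = None
--     for d in diffs:
--         run = run + 1 if d == prev else 1
--         if run >= best_count:
--             best_count, best_val = run, d
--         prev = d
--     return best_val
-- ===== Notes on version B (the rewrite author's own statement) =====
-- stated objective: faster
-- what changed: Replaces the hash-map count plus reverse sort of (diff, count) items with sorting the difference list once and scanning its runs of equal values, keeping the best (count, value) run; ascending order makes the largest-value tie-break fall out of a >= update.
import Mathlib
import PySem

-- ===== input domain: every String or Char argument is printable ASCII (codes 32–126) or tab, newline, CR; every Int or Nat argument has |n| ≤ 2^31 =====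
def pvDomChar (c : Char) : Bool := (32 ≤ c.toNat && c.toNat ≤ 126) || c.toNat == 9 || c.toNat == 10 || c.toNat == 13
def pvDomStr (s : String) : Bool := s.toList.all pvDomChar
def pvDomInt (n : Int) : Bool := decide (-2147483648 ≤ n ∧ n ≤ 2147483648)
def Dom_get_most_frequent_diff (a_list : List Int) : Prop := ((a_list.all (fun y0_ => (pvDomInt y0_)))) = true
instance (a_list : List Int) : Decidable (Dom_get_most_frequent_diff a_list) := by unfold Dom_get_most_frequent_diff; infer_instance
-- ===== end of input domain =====

-- B sorts the difference list once and scans its runs of equal values keeping the best (count, value) run,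
-- instead of A's hash-map counting followed by a reverse sort of the (diff, count) items.

-- ===== PORT A =====
-- Python A: dict counting loop over range(1, len(a_list)), then sorted(items, key=(count, diff), reverse=True)[0][0].
def get_most_frequent_diff (a_list : List Int) : Int :=
  -- state: (diff_count, diff_list)
  let st := (PySem.List.pyRange 1 (a_list.length : Int)).foldl
    (fun (st : PySem.Dict Int Int × List Int) i =>
      -- a_list[i-1] and a_list[i]: i ∈ range(1, len) so both indices are always in range (.getD 0 unreachable)
      let ai_prior := (PySem.List.pyGet? a_list (i - 1)).getD 0
      let ai := (PySem.List.pyGet? a_list i).getD 0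
      let diff := ai - ai_prior
      (st.1.insert diff (st.1.getD diff 0 + 1), st.2 ++ [diff]))
    (PySem.Dict.empty, [])
  -- sorted(diff_count.items(), key=lambda kv: (kv[1], kv[0]), reverse=True)[0][0]
  match PySem.List.pyGet? (PySem.List.sorted2 st.1.items (fun kv => kv.2) (fun kv => kv.1) true) 0 with
  | some kv => kv.1
  | none => 0  -- Python raises IndexError here (no differences); excluded by Pre_

-- ===== PORT B =====
-- Python B: diffs = sorted(b - a for a, b in zip(a_list, a_list[1:])), then one run-scan keeping the best run.
def get_most_frequent_diff_alt (a_list : List Int) : Int :=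
  let diffs := PySem.List.sorted (List.zipWith (fun a b => b - a) a_list a_list.tail) (fun x => x) false
  match diffs with
  | [] => 0  -- Python: diffs[0] raises IndexError; excluded by Pre_
  | d0 :: _ =>
    -- state: (best_count, best_val, run, prev)
    let st := diffs.foldl
      (fun (st : Int × Int × Int × Option Int) d =>
        let run := if (some d == st.2.2.2) then st.2.2.1 + 1 else 1
        if st.1 ≤ run then (run, d, run, some d) else (st.1, st.2.1, run, some d))
      (0, d0, 0, none)
    st.2.1

-- ===== PRECONDITION & SPEC =====
-- Pre_: A raises IndexError (and B does too, at diffs[0]) when there is no consecutive difference, i.e. len(a_list) < 2.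
def Pre_get_most_frequent_diff (a_list : List Int) : Prop := 2 ≤ a_list.length
instance (a_list : List Int) : Decidable (Pre_get_most_frequent_diff a_list) := by unfold Pre_get_most_frequent_diff; infer_instance
def pvWitness_get_most_frequent_diff : List Int := [0, 1, 3, 4]
def Spec_get_most_frequent_diff (a_list : List Int) (out : Int) : Prop := out = get_most_frequent_diff_alt a_list
instance (a_list : List Int) (out : Int) : Decidable (Spec_get_most_frequent_diff a_list out) := by unfold Spec_get_most_frequent_diff; infer_instance

-- ===== CLAIM (what is proved, stated in full; the proofs are below) =====
def Claim_equal_get_most_frequent_diff : Prop := ∀ (a_list : List Int), Dom_get_most_frequent_diff a_list → Pre_get_most_frequent_diff a_list → Spec_get_most_frequent_diff a_list (get_most_frequent_diff a_list)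

-- ===== LEMMAS AND PROOFS =====

-- lexicographic ≤ on (count, value) pairs
def pvLexLe (p q : Int × Int) : Prop := p.1 < q.1 ∨ (p.1 = q.1 ∧ p.2 ≤ q.2)

-- "x is the most frequent difference, largest on count ties" over the difference list ds
def pvBest (ds : List Int) (x : Int) : Prop :=
  x ∈ ds ∧ ∀ e ∈ ds, pvLexLe ((ds.count e : Int), e) ((ds.count x : Int), x)

theorem pvBest_unique {ds : List Int} {x y : Int} (hx : pvBest ds x) (hy : pvBest ds y) : x = y := by
  obtain ⟨hxm, hxb⟩ := hx
  obtain ⟨hym, hyb⟩ := hy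
  have h1 := hxb y hym
  have h2 := hyb x hxm
  unfold pvLexLe at h1 h2
  omega

-- head of an insertBy step
theorem head?_insertBy {α : Type} (bef : α → α → Bool) (x : α) (l : List α) :
    (PySem.List.insertBy bef x l).head? =
      some (match l with | [] => x | h :: _ => if bef x h then x else h) := by
  cases l with
  | nil => simp [PySem.List.insertBy]
  | cons h t =>
    by_cases hb : bef x h = true <;> simp [PySem.List.insertBy, hb]

-- head of an insertBy-fold = running best under `bef`
theorem head?_foldl_insertBy {α : Type} (bef : α → α → Bool) (xs : List α) :
    ∀ (acc : List α),
      (xs.foldl (fun a x => PySem.List.insertBy bef x a) acc).head? =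
        xs.foldl (fun (m : Option α) x =>
          match m with
          | none => some x
          | some h => if bef x h then some x else some h) acc.head? := by
  induction xs with
  | nil => intro acc; simp
  | cons x xs ih =>
    intro acc
    simp only [List.foldl_cons]
    rw [ih]
    congr 1
    cases acc with
    | nil => simp [PySem.List.insertBy]
    | cons h t =>
      rw [head?_insertBy]
      simp only [List.head?_cons]
      split <;> rfl

-- head of the reverse 2-key sort is exactly max2?
theorem head?_sorted2_rev {α : Type} (xs : List α) (k1 k2 : α → Int) :
    (PySem.List.sorted2 xs k1 k2 true).head? = PySem.List.max2? xs k1 k2 := by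
  show (List.foldl _ [] xs).head? = _
  rw [head?_foldl_insertBy]
  rfl

theorem pv_max2?_fold_inv {α : Type} (k1 k2 : α → Int) :
    ∀ (xs : List α) (m r : α),
      xs.foldl (fun (acc : Option α) x =>
        match acc with
        | none => some x
        | some m =>
          if (decide (k1 m < k1 x) || !decide (k1 x < k1 m) && decide (k2 m < k2 x)) = true
          then some x else some m) (some m) = some r →
      (r = m ∨ r ∈ xs) ∧ pvLexLe (k1 m, k2 m) (k1 r, k2 r) ∧
        ∀ y ∈ xs, pvLexLe (k1 y, k2 y) (k1 r, k2 r) := by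
  intro xs
  induction xs with
  | nil =>
    intro m r h
    simp only [List.foldl_nil, Option.some.injEq] at h
    subst h
    exact ⟨Or.inl rfl, Or.inr ⟨rfl, le_refl _⟩, by simp⟩
  | cons x xs ih =>
    intro m r h
    simp only [List.foldl_cons] at h
    by_cases hc : (decide (k1 m < k1 x) || !decide (k1 x < k1 m) && decide (k2 m < k2 x)) = true
    · rw [if_pos hc] at h
      obtain ⟨hmem, hlex, hall⟩ := ih x r h
      simp only [Bool.or_eq_true, Bool.and_eq_true, Bool.not_eq_true', decide_eq_true_eq,
        decide_eq_false_iff_not] at hc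
      have hmx : pvLexLe (k1 m, k2 m) (k1 x, k2 x) := by
        unfold pvLexLe; simp only
        rcases hc with h1 | ⟨h1, h2⟩
        · omega
        · omega
      refine ⟨?_, ?_, ?_⟩
      · rcases hmem with h' | h'
        · exact Or.inr (h' ▸ List.mem_cons_self)
        · exact Or.inr (List.mem_cons_of_mem _ h')
      · unfold pvLexLe at *; simp only at *; omega
      · intro y hy
        rcases List.mem_cons.mp hy with rfl | hy'
        · exact hlex
        · exact hall y hy'
    · rw [if_neg hc] at h
      obtain ⟨hmem, hlex, hall⟩ := ih m r h
      simp only [Bool.or_eq_true, Bool.and_eq_true, Bool.not_eq_true', decide_eq_true_eq,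
        decide_eq_false_iff_not] at hc
      push_neg at hc
      refine ⟨?_, hlex, ?_⟩
      · rcases hmem with h' | h'
        · exact Or.inl h'
        · exact Or.inr (List.mem_cons_of_mem _ h')
      · intro y hy
        rcases List.mem_cons.mp hy with rfl | hy'
        · -- x is not better than m, and m ≤ r
          have hxm : pvLexLe (k1 y, k2 y) (k1 m, k2 m) := by
            unfold pvLexLe; simp only
            obtain ⟨h1, h2⟩ := hc
            by_cases h3 : k1 y < k1 m
            · omega
            · have := h2 (by omega)
              omega
          unfold pvLexLe at *; simp only at *; omega
        · exact hall y hy'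

theorem max2?_eq_some {α : Type} {xs : List α} {k1 k2 : α → Int} {m : α}
    (h : PySem.List.max2? xs k1 k2 = some m) :
    m ∈ xs ∧ ∀ y ∈ xs, pvLexLe (k1 y, k2 y) (k1 m, k2 m) := by
  cases xs with
  | nil => simp [PySem.List.max2?] at h
  | cons x xs =>
    have h' : xs.foldl (fun (acc : Option α) x =>
        match acc with
        | none => some x
        | some m =>
          if (decide (k1 m < k1 x) || !decide (k1 x < k1 m) && decide (k2 m < k2 x)) = true
          then some x else some m) (some x) = some m := h
    obtain ⟨hmem, hlex, hall⟩ := pv_max2?_fold_inv k1 k2 xs x m h'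
    refine ⟨?_, ?_⟩
    · rcases hmem with h' | h'
      · exact h' ▸ List.mem_cons_self
      · exact List.mem_cons_of_mem _ h'
    · intro y hy
      rcases List.mem_cons.mp hy with rfl | hy'
      · exact hlex
      · exact hall y hy'

theorem pv_max2?_ne_none {α : Type} {k1 k2 : α → Int} :
    ∀ (xs : List α) (m : α),
      xs.foldl (fun (acc : Option α) x =>
        match acc with
        | none => some x
        | some m =>
          if (decide (k1 m < k1 x) || !decide (k1 x < k1 m) && decide (k2 m < k2 x)) = true
          then some x else some m) (some m) ≠ none := by
  intro xs
  induction xs with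
  | nil => intro m h; simp at h
  | cons x xs ih =>
    intro m
    simp only [List.foldl_cons]
    split <;> apply ih

theorem max2?_isSome_of_ne_nil {α : Type} {xs : List α} (k1 k2 : α → Int) (h : xs ≠ []) :
    ∃ m, PySem.List.max2? xs k1 k2 = some m := by
  cases xs with
  | nil => exact absurd rfl h
  | cons x xs =>
    cases hm : PySem.List.max2? (x :: xs) k1 k2 with
    | some m => exact ⟨m, rfl⟩
    | none => exact absurd hm (pv_max2?_ne_none xs x)

-- A's index loop produces exactly the zipWith difference list
theorem pv_diffs_nat : ∀ (a : List Int),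
    (List.range (a.length - 1)).map (fun k => a.getD (k + 1) 0 - a.getD k 0) =
      List.zipWith (fun x y => y - x) a a.tail := by
  intro a
  induction a with
  | nil => simp
  | cons x t ih =>
    cases t with
    | nil => simp
    | cons y t' =>
      simp only [List.length_cons, Nat.add_sub_cancel, List.tail_cons] at *
      rw [List.range_succ_eq_map]
      simp only [List.map_cons, List.map_map, List.zipWith_cons_cons]
      congr 1

theorem pv_diffs_map (a : List Int) :
    (PySem.List.pyRange 1 (a.length : Int)).map
        (fun i => (PySem.List.pyGet? a i).getD 0 - (PySem.List.pyGet? a (i - 1)).getD 0) =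
      List.zipWith (fun x y => y - x) a a.tail := by
  rw [PySem.List.pyRange_one]
  rw [List.map_map]
  have hlen : ((a.length : Int) - 1).toNat = a.length - 1 := by omega
  rw [hlen, ← pv_diffs_nat a]
  apply List.map_congr_left
  intro k hk
  simp only [Function.comp]
  have h1 : (1 : Int) + (k : Int) = ((k + 1 : Nat) : Int) := by push_cast; ring
  rw [h1]
  rw [PySem.List.pyGet?_natCast]
  have h3 : ((k + 1 : Nat) : Int) - 1 = ((k : Nat) : Int) := by push_cast; ring
  rw [h3, PySem.List.pyGet?_natCast]
  simp [List.getD]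

-- A's index-loop fold, rewritten over the difference list (zeta-reduced form of the port's loop body)
theorem pv_foldA (a : List Int) (init : PySem.Dict Int Int × List Int) :
    (PySem.List.pyRange 1 (a.length : Int)).foldl
      (fun (st : PySem.Dict Int Int × List Int) i =>
        (st.1.insert ((PySem.List.pyGet? a i).getD 0 - (PySem.List.pyGet? a (i - 1)).getD 0)
          (st.1.getD ((PySem.List.pyGet? a i).getD 0 - (PySem.List.pyGet? a (i - 1)).getD 0) 0 + 1),
         st.2 ++ [(PySem.List.pyGet? a i).getD 0 - (PySem.List.pyGet? a (i - 1)).getD 0])) init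
    = (List.zipWith (fun x y => y - x) a a.tail).foldl
        (fun st diff => (st.1.insert diff (st.1.getD diff 0 + 1), st.2 ++ [diff])) init := by
  rw [← pv_diffs_map a, List.foldl_map]

-- first projection of the pair-state fold is the dict fold
theorem pv_foldl_fstA (xs : List Int) (b0 : PySem.Dict Int Int) (c0 : List Int) :
    (xs.foldl (fun (st : PySem.Dict Int Int × List Int) diff =>
        (st.1.insert diff (st.1.getD diff 0 + 1), st.2 ++ [diff])) (b0, c0)).1
    = xs.foldl (fun d x => d.insert x (d.getD x 0 + 1)) b0 := by
  induction xs generalizing b0 c0 with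
  | nil => rfl
  | cons x xs ih => simpa using ih _ _

theorem pv_pyGet?_zero {α : Type} (l : List α) : PySem.List.pyGet? l 0 = l.head? := by
  have := PySem.List.pyGet?_natCast l 0
  simpa [List.head?_eq_getElem?] using this

theorem pv_ds_ne_nil {a_list : List Int} (h : 2 ≤ a_list.length) :
    List.zipWith (fun x y => y - x) a_list a_list.tail ≠ [] := by
  intro h0
  have := congrArg List.length h0
  simp [List.length_zipWith, List.length_tail] at this
  omega

-- A's result is the best difference
theorem pvA_best (a_list : List Int) (h : 2 ≤ a_list.length) :
    pvBest (List.zipWith (fun x y => y - x) a_list a_list.tail) (get_most_frequent_diff a_list) := by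
  have hne := pv_ds_ne_nil h
  have hsne : PySem.Set.ofList (List.zipWith (fun x y => y - x) a_list a_list.tail) ≠ [] := by
    intro h0
    rcases List.exists_mem_of_ne_nil _ hne with ⟨x, hx⟩
    have := (PySem.Set.mem_ofList _ x).mpr hx
    rw [h0] at this
    exact absurd this (List.not_mem_nil)
  have hitems_ne : (PySem.Set.ofList (List.zipWith (fun x y => y - x) a_list a_list.tail)).map
      (fun k => (k, ((List.zipWith (fun x y => y - x) a_list a_list.tail).count k : Int))) ≠ [] := by
    simpa using hsne
  obtain ⟨kv, hkv⟩ := max2?_isSome_of_ne_nil (xs :=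
    (PySem.Set.ofList (List.zipWith (fun x y => y - x) a_list a_list.tail)).map
      (fun k => (k, ((List.zipWith (fun x y => y - x) a_list a_list.tail).count k : Int))))
    (fun kv => kv.2) (fun kv => kv.1) hitems_ne
  have hhead := (head?_sorted2_rev _ (fun kv : Int × Int => kv.2) (fun kv => kv.1)).trans hkv
  unfold get_most_frequent_diff
  simp only [pv_foldA, pv_foldl_fstA, PySem.Dict.foldl_insert_getD_add_one_eq_counter,
    PySem.Dict.items_counter, pv_pyGet?_zero, hhead]
  obtain ⟨hmem, hall⟩ := max2?_eq_some hkv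
  rcases List.mem_map.mp hmem with ⟨k, hk, hfk⟩
  have hk1 : kv.1 = k := by rw [← hfk]
  have hk2 : kv.2 = ((List.zipWith (fun x y => y - x) a_list a_list.tail).count k : Int) := by
    rw [← hfk]
  rw [hk1]
  constructor
  · exact (PySem.Set.mem_ofList _ k).mp hk
  · intro e he
    have hfe := hall (e, ((List.zipWith (fun x y => y - x) a_list a_list.tail).count e : Int))
      (List.mem_map.mpr ⟨e, (PySem.Set.mem_ofList _ e).mpr he, rfl⟩)
    simp only at hfe
    rw [hk1, hk2] at hfe
    unfold pvLexLe at *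
    simp only at *
    omega

-- B's run-scan step (zeta-reduced form of the port's loop body)
def pvStepB (st : Int × Int × Int × Option Int) (d : Int) : Int × Int × Int × Option Int :=
  if st.1 ≤ (if (some d == st.2.2.2) then st.2.2.1 + 1 else 1)
  then ((if (some d == st.2.2.2) then st.2.2.1 + 1 else 1), d,
        (if (some d == st.2.2.2) then st.2.2.1 + 1 else 1), some d)
  else (st.1, st.2.1, (if (some d == st.2.2.2) then st.2.2.1 + 1 else 1), some d)

-- invariant of B's run-scan over the processed (ascending) prefix u
def pvInvB (u : List Int) (st : Int × Int × Int × Option Int) : Prop :=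
  ∃ dl, st.2.2.2 = some dl ∧ dl ∈ u ∧ (∀ e ∈ u, e ≤ dl) ∧ st.2.2.1 = (u.count dl : Int) ∧
    st.2.1 ∈ u ∧ st.1 = (u.count st.2.1 : Int) ∧
    ∀ e ∈ u, pvLexLe ((u.count e : Int), e) ((u.count st.2.1 : Int), st.2.1)

theorem pvInvB_step (u : List Int) (d : Int) (st : Int × Int × Int × Option Int)
    (hle : ∀ e ∈ u, e ≤ d) (hinv : pvInvB u st) : pvInvB (u ++ [d]) (pvStepB st d) := by
  obtain ⟨dl, hprev, hdlm, hdlmax, hrun, hbvm, hbc, hbnd⟩ := hinv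
  obtain ⟨bc, bv, run, prev⟩ := st
  simp only at hprev hrun hbvm hbc hbnd
  subst hprev hrun hbc
  have hcount_app : ∀ e : Int, (u ++ [d]).count e = u.count e + if d = e then 1 else 0 := by
    intro e
    by_cases h : d = e <;> simp [List.count_append, h]
  have hdle : dl ≤ d := hle dl hdlm
  have hrun' : (if (some d == some dl) then ((u.count dl : Int)) + 1 else 1) = ((u ++ [d]).count d : Int) := by
    by_cases hd : d = dl
    · subst hd
      simp [hcount_app]
    · have hd0 : u.count d = 0 := by
        rw [List.count_eq_zero]
        intro hmem
        exact hd (le_antisymm (hdlmax d hmem) hdle)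
      have : (some d == some dl) = false := by
        simp [hd]
      rw [this]
      simp [hcount_app, hd0]
  unfold pvStepB
  simp only
  rw [hrun']
  have hmax' : ∀ e ∈ u ++ [d], e ≤ d := by
    intro e he
    rcases List.mem_append.mp he with h | h
    · exact hle e h
    · exact le_of_eq (by simpa using h)
  by_cases hif : (u.count bv : Int) ≤ ((u ++ [d]).count d : Int)
  · rw [if_pos hif]
    refine ⟨d, rfl, by simp, hmax', rfl, by simp, rfl, ?_⟩
    intro e he
    rcases List.mem_append.mp he with h | h
    · by_cases hed : e = d
      · subst hed; exact Or.inr ⟨rfl, le_refl _⟩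
      · have hce : (u ++ [d]).count e = u.count e := by
          rw [hcount_app]; simp [Ne.symm hed]
        have hbe := hbnd e h
        have hed' : e ≤ d := hle e h
        unfold pvLexLe at *
        simp only at *
        omega
    · simp at h
      subst h
      exact Or.inr ⟨rfl, le_refl _⟩
  · rw [if_neg hif]
    have hbvd : bv ≠ d := by
      intro h
      subst h
      have h2 := hcount_app bv
      rw [if_pos rfl] at h2
      omega
    have hcbv : (u ++ [d]).count bv = u.count bv := by
      rw [hcount_app]; simp [Ne.symm hbvd]
    refine ⟨d, rfl, by simp, hmax', rfl, List.mem_append.mpr (Or.inl hbvm), by rw [hcbv], ?_⟩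
    intro e he
    rw [hcbv]
    rcases List.mem_append.mp he with h | h
    · by_cases hed : e = d
      · subst hed
        unfold pvLexLe; simp only
        omega
      · have hce : (u ++ [d]).count e = u.count e := by
          rw [hcount_app]; simp [Ne.symm hed]
        have hbe := hbnd e h
        unfold pvLexLe at *
        simp only at *
        omega
    · simp at h
      subst h
      unfold pvLexLe; simp only
      omega

theorem pvB_fold (rest : List Int) : ∀ (u : List Int) (st : Int × Int × Int × Option Int),
    List.Pairwise (· ≤ ·) (u ++ rest) → pvInvB u st →
    pvInvB (u ++ rest) (rest.foldl pvStepB st) := by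
  induction rest with
  | nil => intro u st _ h; simpa using h
  | cons d rest ih =>
    intro u st hpw hinv
    have hle : ∀ e ∈ u, e ≤ d := by
      intro e he
      have := (List.pairwise_append.mp hpw).2.2
      exact this e he d List.mem_cons_self
    have hpw' : List.Pairwise (· ≤ ·) ((u ++ [d]) ++ rest) := by
      rw [List.append_assoc]
      simpa using hpw
    have := ih (u ++ [d]) (pvStepB st d) hpw' (pvInvB_step u d st hle hinv)
    simpa [List.append_assoc] using this

-- B's result is the best difference
theorem pvB_best (a_list : List Int) (h : 2 ≤ a_list.length) :
    pvBest (List.zipWith (fun x y => y - x) a_list a_list.tail) (get_most_frequent_diff_alt a_list) := by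
  have hne := pv_ds_ne_nil h
  unfold get_most_frequent_diff_alt
  cases hs : PySem.List.sorted (List.zipWith (fun a b => b - a) a_list a_list.tail) (fun x => x) false with
  | nil =>
    exact absurd ((PySem.List.sorted_eq_nil_iff _ _ _).mp hs) hne
  | cons d0 rest =>
    show pvBest _ (((d0 :: rest).foldl pvStepB (0, d0, 0, none)).2.1)
    have hperm : (d0 :: rest).Perm (List.zipWith (fun x y => y - x) a_list a_list.tail) := by
      rw [← hs]
      exact PySem.List.sorted_perm _ _ _
    have hpw : List.Pairwise (· ≤ ·) (d0 :: rest) := by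
      have := PySem.List.sorted_pairwise (List.zipWith (fun a b => b - a) a_list a_list.tail)
        (fun x => x)
      rw [hs] at this
      exact this
    have hst1 : pvStepB (0, d0, 0, none) d0 = (1, d0, 1, some d0) := by
      simp [pvStepB]
    have hinv1 : pvInvB [d0] (1, d0, 1, some d0) := by
      refine ⟨d0, rfl, List.mem_cons_self, ?_, by simp, List.mem_cons_self, by simp, ?_⟩
      · intro e he; simp at he; omega
      · intro e he
        simp at he
        subst he
        exact Or.inr ⟨rfl, le_refl _⟩
    have hfold := pvB_fold rest [d0] (1, d0, 1, some d0) (by simpa using hpw) hinv1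
    have hfeq : (d0 :: rest).foldl pvStepB (0, d0, 0, none) = rest.foldl pvStepB (1, d0, 1, some d0) := by
      rw [List.foldl_cons, hst1]
    rw [hfeq]
    obtain ⟨dl, _, _, _, _, hbvm, _, hbnd⟩ := hfold
    have hcnt : ∀ e : Int, ([d0] ++ rest).count e =
        (List.zipWith (fun x y => y - x) a_list a_list.tail).count e := by
      intro e
      exact hperm.count_eq e
    constructor
    · exact hperm.mem_iff.mp (by simpa using hbvm)
    · intro e he
      have he' : e ∈ [d0] ++ rest := by
        simpa using hperm.mem_iff.mpr he
      have := hbnd e he'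
      rw [hcnt e, hcnt _] at this
      exact this

-- ===== VERDICT (by name: the statement is the Claim_ definition above) =====
theorem get_most_frequent_diff_spec : Claim_equal_get_most_frequent_diff := by
  intro a_list _ hpre
  unfold Spec_get_most_frequent_diff
  exact pvBest_unique (pvA_best a_list hpre) (pvB_best a_list hpre)
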